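-- pv_equiv track=rewrite | github.com/lixianjian/brush | algorithm/check.py | list_turn
-- ===== SOURCE A (Python) =====
-- def list_turn(l1=[], l2=[]):
--
--     if not l2:
--         return l1
--
--     if not l1:
--         return l2
--
--     l3 = []
--     length1 = len(l1)
--     length2 = len(l2)
--     length = min(length1, length2)
--     for i in range(length):
--         l3.append(l1[i])
--         l3.append(l2[i])
--
--     if length1 > length:
--         l3.extend(l1[length:])
--     else:
--         l3.extend(l2[length:])
--     return l3
-- ===== SOURCE B (Python) =====
-- def list_turn(l1=[], l2=[]):
--     if not l2:
--         return l1
--     if not l1: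
--         return l2
--     n = min(len(l1), len(l2))
--     res = [None] * (2 * n)
--     res[0::2] = l1[:n]
--     res[1::2] = l2[:n]
--     res += l1[n:] if len(l1) > n else l2[n:]
--     return res
-- ===== Notes on version B (the rewrite author's own statement) =====
-- stated objective: alternative
-- what changed: Replaces the pairwise append loop with preallocation of a 2n slot buffer filled by two strided slice assignments (res[0::2], res[1::2]) and one tail extend.
import Mathlib
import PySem

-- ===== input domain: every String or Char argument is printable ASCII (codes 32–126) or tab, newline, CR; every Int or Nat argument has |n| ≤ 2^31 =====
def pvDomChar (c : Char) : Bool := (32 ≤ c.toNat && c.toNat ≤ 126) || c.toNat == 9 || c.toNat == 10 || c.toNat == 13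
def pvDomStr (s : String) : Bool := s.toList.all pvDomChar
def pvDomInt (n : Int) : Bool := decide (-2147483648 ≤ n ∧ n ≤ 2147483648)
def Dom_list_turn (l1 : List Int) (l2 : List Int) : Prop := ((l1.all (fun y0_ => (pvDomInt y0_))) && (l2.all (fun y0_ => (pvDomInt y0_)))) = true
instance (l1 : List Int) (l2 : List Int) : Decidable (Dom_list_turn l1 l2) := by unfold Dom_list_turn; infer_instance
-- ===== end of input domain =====

-- B preallocates a 2n-slot buffer and fills it with two strided slice assignments instead of A's pairwise append loop (alternative, same cost).


-- ===== PORT A =====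
-- literal port of A: guards, index loop appending l1[i], l2[i], then extend with a slice tail
def list_turn (l1 : List Int) (l2 : List Int) : List Int :=
  if l2.isEmpty then l1
  else if l1.isEmpty then l2
  else
    let length1 : Int := PySem.List.len l1
    let length2 : Int := PySem.List.len l2
    let length : Int := min length1 length2
    let l3 : List Int := (PySem.List.pyRange 0 length 1).foldl
      (fun acc i => (acc ++ [PySem.List.pyGetD l1 i 0]) ++ [PySem.List.pyGetD l2 i 0]) []
    if length1 > length then l3 ++ PySem.List.slice l1 (some length) none
    else l3 ++ PySem.List.slice l2 (some length) none

-- ===== PORT B =====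
-- strided slice assignment res[start::step] = vals (step = 2 here): write each value at start, start+step, …
def setStride : List Int → Nat → Nat → List Int → List Int
  | res, _, _, [] => res
  | res, start, step, v :: vs => setStride (res.set start v) (start + step) step vs

-- port of B: preallocate 2n slots (Python's None placeholder modeled as 0; every slot is overwritten),
-- fill even and odd positions by two strided writes, then append the tail
def list_turn_alt (l1 : List Int) (l2 : List Int) : List Int :=
  if l2.isEmpty then l1
  else if l1.isEmpty then l2
  else
    let n := min l1.length l2.length
    let res0 := List.replicate (2 * n) (0 : Int)
    let res1 := setStride res0 0 2 (l1.take n)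
    let res2 := setStride res1 1 2 (l2.take n)
    res2 ++ (if l1.length > n then l1.drop n else l2.drop n)

-- ===== PRECONDITION & SPEC =====
def Spec_list_turn (l1 : List Int) (l2 : List Int) (out : List Int) : Prop := out = list_turn_alt l1 l2
instance (l1 : List Int) (l2 : List Int) (out : List Int) : Decidable (Spec_list_turn l1 l2 out) := by unfold Spec_list_turn; infer_instance

-- ===== CLAIM (what is proved, stated in full; the proofs are below) =====
def Claim_equal_list_turn : Prop := ∀ (l1 : List Int) (l2 : List Int), Dom_list_turn l1 l2 → Spec_list_turn l1 l2 (list_turn l1 l2)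

-- ===== LEMMAS AND PROOFS =====

-- writing with step 2 at offset s+2 leaves the first two cells alone
lemma setStride_cons2 : ∀ (vals res : List Int) (u v : Int) (s : Nat),
    setStride (u :: v :: res) (s + 2) 2 vals = u :: v :: setStride res s 2 vals := by
  intro vals
  induction vals with
  | nil => intro res u v s; rfl
  | cons w ws ih =>
      intro res u v s
      simp only [setStride, List.set]
      exact ih (res.set s w) u v (s + 1 + 1)

-- the two strided passes over a fresh 2n buffer produce the interleaving of the two length-n lists
lemma setStride_interleave : ∀ (a b : List Int), a.length = b.length →
    setStride (setStride (List.replicate (2 * a.length) (0 : Int)) 0 2 a) 1 2 b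
      = (a.zip b).flatMap (fun p => [p.1, p.2]) := by
  intro a
  induction a with
  | nil =>
      intro b hb
      have : b = [] := List.eq_nil_of_length_eq_zero hb.symm
      simp [this, setStride]
  | cons x xs ih =>
      intro b hb
      obtain ⟨y, ys, rfl⟩ : ∃ y ys, b = y :: ys := by
        cases b with
        | nil => simp at hb
        | cons y ys => exact ⟨y, ys, rfl⟩
      have hlen : xs.length = ys.length := by simpa using hb
      have hrep : List.replicate (2 * (x :: xs).length) (0 : Int)
          = 0 :: 0 :: List.replicate (2 * xs.length) (0 : Int) := by
        simp [List.length_cons, Nat.mul_succ]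
        rw [show 2 * xs.length + 2 = (2 * xs.length + 1) + 1 by ring]
        simp [List.replicate_succ]
      rw [hrep]
      simp only [setStride, List.set]
      rw [show (0 : Nat) + 2 = 0 + 2 by rfl]
      rw [setStride_cons2 xs (List.replicate (2 * xs.length) (0 : Int)) x 0 0]
      simp only [List.set]
      rw [setStride_cons2 ys (setStride (List.replicate (2 * xs.length) (0 : Int)) 0 2 xs) x y 1]
      rw [ih ys hlen]
      simp

-- the zip of two lists, written as index lookups over range(min len)
lemma range_map_getD_eq_zip : ∀ (l1 l2 : List Int),
    (List.range (min l1.length l2.length)).map (fun k => (l1.getD k 0, l2.getD k 0)) = l1.zip l2 := by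
  intro l1 l2
  apply List.ext_getElem
  · simp
  · intro k h1 h2
    simp at h1 h2 ⊢
    constructor
    · simp [List.getElem?_eq_getElem h1.1]
    · simp [List.getElem?_eq_getElem h1.2]

-- zipping the min-length prefixes is the same as zipping the lists
lemma zip_take_min (l1 l2 : List Int) :
    (l1.take (min l1.length l2.length)).zip (l2.take (min l1.length l2.length)) = l1.zip l2 := by
  exact Eq.symm List.zip_eq_zip_take_min

-- ===== VERDICT (by name: the statement is the Claim_ definition above) =====
theorem list_turn_spec : Claim_equal_list_turn := by
  intro l1 l2 _
  unfold Spec_list_turn list_turn list_turn_alt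
  by_cases h2 : l2.isEmpty
  · simp [h2]
  by_cases h1 : l1.isEmpty
  · simp [h1, h2]
  simp only [h1, h2]
  set n : Nat := min l1.length l2.length with hn
  have hmin : min (PySem.List.len l1) (PySem.List.len l2) = (n : Int) := by
    simp [PySem.List.len, hn]
  have hbody : ∀ (acc : List Int) (i : Int),
      (acc ++ [PySem.List.pyGetD l1 i 0]) ++ [PySem.List.pyGetD l2 i 0]
      = acc ++ [PySem.List.pyGetD l1 i 0, PySem.List.pyGetD l2 i 0] := by
    intro acc i; simp
  have hloop : (PySem.List.pyRange 0 (min (PySem.List.len l1) (PySem.List.len l2)) 1).foldl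
      (fun acc i => (acc ++ [PySem.List.pyGetD l1 i 0]) ++ [PySem.List.pyGetD l2 i 0]) []
      = (l1.zip l2).flatMap (fun p => [p.1, p.2]) := by
    rw [hmin]
    have := PySem.List.foldl_append_eq_flatMap
      (fun i => [PySem.List.pyGetD l1 i 0, PySem.List.pyGetD l2 i 0])
      (PySem.List.pyRange 0 (n : Int) 1) []
    calc (PySem.List.pyRange 0 (n : Int) 1).foldl
          (fun acc i => (acc ++ [PySem.List.pyGetD l1 i 0]) ++ [PySem.List.pyGetD l2 i 0]) []
        = (PySem.List.pyRange 0 (n : Int) 1).foldl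
          (fun acc i => acc ++ [PySem.List.pyGetD l1 i 0, PySem.List.pyGetD l2 i 0]) [] := by
          simp only [hbody]
      _ = (PySem.List.pyRange 0 (n : Int) 1).flatMap
          (fun i => [PySem.List.pyGetD l1 i 0, PySem.List.pyGetD l2 i 0]) := by
          rw [this]; simp
      _ = (List.range n).flatMap (fun k => [l1.getD k 0, l2.getD k 0]) := by
          rw [PySem.List.pyRange_zero_natCast, List.flatMap_map]
          refine List.flatMap_congr ?_
          intro k _
          simp [PySem.List.pyGetD_natCast]
      _ = (l1.zip l2).flatMap (fun p => [p.1, p.2]) := by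
          rw [← range_map_getD_eq_zip, List.flatMap_map]
  have hbuf : setStride (setStride (List.replicate (2 * n) (0 : Int)) 0 2 (l1.take n)) 1 2 (l2.take n)
      = (l1.zip l2).flatMap (fun p => [p.1, p.2]) := by
    have hta : (l1.take n).length = n := by simp [hn]
    have htb : (l1.take n).length = (l2.take n).length := by simp [hn]
    have := setStride_interleave (l1.take n) (l2.take n) htb
    rw [hta] at this
    rw [this, hn, zip_take_min]
  have htail1 : PySem.List.slice l1 (some (min (PySem.List.len l1) (PySem.List.len l2))) none
      = l1.drop n := by rw [hmin, PySem.List.slice_from_natCast]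
  have htail2 : PySem.List.slice l2 (some (min (PySem.List.len l1) (PySem.List.len l2))) none
      = l2.drop n := by rw [hmin, PySem.List.slice_from_natCast]
  have hcond : (PySem.List.len l1 > min (PySem.List.len l1) (PySem.List.len l2))
      = (l1.length > n) := by
    simp [PySem.List.len, hn]
  simp only [hloop, hbuf, htail1, htail2, hcond]
  by_cases hc : l1.length > n
  · rw [if_pos hc, if_pos hc]
  · rw [if_neg hc, if_neg hc]
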